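-- pv_equiv track=rewrite | github.com/yjk-bertrand/AligerA | aligera_scripts/STEP4_scripts.py | does_overlap
-- ===== SOURCE A (Python) =====
-- def does_overlap(item, min_overlap, taxa_profiles):
--     """
--     Calculte sequence overlap
--     """
--     item_overlap = sum(
--         a == b for a, b in zip(taxa_profiles[item[0]], taxa_profiles[item[1]]) if a == 1
--     )
--     if item_overlap > min_overlap:
--         return True
--     else:
--         return False
-- ===== SOURCE B (Python) =====
-- def does_overlap(item, min_overlap, taxa_profiles):
--     """
--     Calculte sequence overlap
--     """
--     pairs = list(zip(taxa_profiles[item[0]], taxa_profiles[item[1]]))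
--     s1 = {i for i, (a, _) in enumerate(pairs) if a == 1}
--     s2 = {i for i, (_, b) in enumerate(pairs) if b == 1}
--     return len(s1 & s2) > min_overlap
-- ===== Notes on version B (the rewrite author's own statement) =====
-- stated objective: alternative
-- what changed: Replaces the single filtered counting pass over the zipped profiles by building two index sets of 1-positions (one per profile) and comparing the size of their intersection with the threshold.
import Mathlib
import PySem

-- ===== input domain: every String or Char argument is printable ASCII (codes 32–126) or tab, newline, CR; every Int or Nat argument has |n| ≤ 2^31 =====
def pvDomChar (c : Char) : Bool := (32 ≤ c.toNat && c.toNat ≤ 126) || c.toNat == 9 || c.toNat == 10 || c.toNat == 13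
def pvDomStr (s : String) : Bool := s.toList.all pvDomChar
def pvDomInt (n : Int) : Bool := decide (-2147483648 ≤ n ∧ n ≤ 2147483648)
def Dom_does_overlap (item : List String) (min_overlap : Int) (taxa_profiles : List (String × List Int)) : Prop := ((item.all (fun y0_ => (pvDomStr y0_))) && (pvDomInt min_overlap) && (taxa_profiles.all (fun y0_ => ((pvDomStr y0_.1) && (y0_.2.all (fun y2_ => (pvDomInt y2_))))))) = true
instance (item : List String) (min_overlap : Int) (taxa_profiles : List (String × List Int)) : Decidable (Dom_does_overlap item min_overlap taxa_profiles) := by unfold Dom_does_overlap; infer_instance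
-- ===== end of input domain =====

-- B replaces A's single filtered counting pass by building two index sets of 1-positions and
-- intersecting them (objective: alternative, structurally different at the same cost).

-- ===== PORT A =====
def does_overlap (item : List String) (min_overlap : Int) (taxa_profiles : List (String × List Int)) : Bool :=
  match PySem.List.pyGet? item 0, PySem.List.pyGet? item 1 with
  | some k0, some k1 =>
    match taxa_profiles.lookup k0, taxa_profiles.lookup k1 with
    | some pr0, some pr1 =>
        let item_overlap : Int :=
          (List.zip pr0 pr1).foldl
            (fun acc ab => if ab.1 = 1 then acc + (if ab.1 = ab.2 then 1 else 0) else acc) 0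
        if item_overlap > min_overlap then true else false
    | _, _ => false   -- KeyError in Python: excluded by Pre_
  | _, _ => false     -- IndexError in Python: excluded by Pre_

-- ===== PORT B =====
def does_overlap_alt (item : List String) (min_overlap : Int) (taxa_profiles : List (String × List Int)) : Bool :=
  -- item[i] then taxa_profiles[...] fetched as one optional step each (raises are excluded by Pre_)
  match (PySem.List.pyGet? item 0).bind (fun k => taxa_profiles.lookup k) with
  | none => false    -- IndexError/KeyError in Python: excluded by Pre_
  | some pr0 =>
    match (PySem.List.pyGet? item 1).bind (fun k => taxa_profiles.lookup k) with
    | none => false  -- IndexError/KeyError in Python: excluded by Pre_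
    | some pr1 =>
        let pairs := List.zip pr0 pr1
        let s1 : PySem.Set Int :=
          PySem.Set.ofList (((PySem.List.enumerate pairs).filter (fun p => p.2.1 == 1)).map (·.1))
        let s2 : PySem.Set Int :=
          PySem.Set.ofList (((PySem.List.enumerate pairs).filter (fun p => p.2.2 == 1)).map (·.1))
        decide ((PySem.Set.inter s1 s2).len > min_overlap)

-- ===== PRECONDITION & SPEC =====
-- Pre_ excludes exactly the inputs on which A raises: item shorter than 2 (IndexError) or a
-- listed taxon missing from taxa_profiles (KeyError).
def Pre_does_overlap (item : List String) (min_overlap : Int) (taxa_profiles : List (String × List Int)) : Prop :=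
  2 ≤ item.length ∧ ∀ s ∈ item.take 2, (taxa_profiles.lookup s).isSome = true
instance (item : List String) (min_overlap : Int) (taxa_profiles : List (String × List Int)) : Decidable (Pre_does_overlap item min_overlap taxa_profiles) := by unfold Pre_does_overlap; infer_instance
def pvWitness_does_overlap : List String × Int × (List (String × List Int)) :=
  (["x", "y"], 1, [("x", [1, 0, 1, 1]), ("y", [1, 1, 0, 1])])

def Spec_does_overlap (item : List String) (min_overlap : Int) (taxa_profiles : List (String × List Int)) (out : Bool) : Prop := out = does_overlap_alt item min_overlap taxa_profiles
instance (item : List String) (min_overlap : Int) (taxa_profiles : List (String × List Int)) (out : Bool) : Decidable (Spec_does_overlap item min_overlap taxa_profiles out) := by unfold Spec_does_overlap; infer_instance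

-- ===== CLAIM (what is proved, stated in full; the proofs are below) =====
def Claim_equal_does_overlap : Prop := ∀ (item : List String) (min_overlap : Int) (taxa_profiles : List (String × List Int)), Dom_does_overlap item min_overlap taxa_profiles → Pre_does_overlap item min_overlap taxa_profiles → Spec_does_overlap item min_overlap taxa_profiles (does_overlap item min_overlap taxa_profiles)

-- ===== LEMMAS AND PROOFS =====

-- positions (counted from s) of the pairs of l that satisfy P
def pvIdx (P : Int × Int → Bool) (l : List (Int × Int)) (s : Int) : List Int :=
  ((PySem.List.enumerate l s).filter (fun p => P p.2)).map (·.1)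

theorem pvIdx_nil (P : Int × Int → Bool) (s : Int) : pvIdx P [] s = [] := rfl

theorem pvIdx_cons (P : Int × Int → Bool) (x : Int × Int) (l : List (Int × Int)) (s : Int) :
    pvIdx P (x :: l) s = (if P x then [s] else []) ++ pvIdx P l (s + 1) := by
  simp only [pvIdx, PySem.List.enumerate_cons, List.filter_cons]
  split <;> simp

theorem pvIdx_le (P : Int × Int → Bool) (l : List (Int × Int)) (s : Int) :
    ∀ i ∈ pvIdx P l s, s ≤ i := by
  intro i hi
  simp only [pvIdx, List.mem_map, List.mem_filter] at hi
  obtain ⟨p, ⟨hp, _⟩, rfl⟩ := hi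
  rw [PySem.List.mem_enumerate_iff] at hp
  obtain ⟨k, _, rfl⟩ := hp
  omega

theorem pvIdx_nodup (P : Int × Int → Bool) (l : List (Int × Int)) (s : Int) :
    (pvIdx P l s).Nodup := by
  have h : ((PySem.List.enumerate l s).filter (fun p => P p.2)).Pairwise
      (fun p q : Int × (Int × Int) => p.1 < q.1) :=
    List.Pairwise.sublist List.filter_sublist (PySem.List.pairwise_lt_enumerate l s)
  exact (List.Pairwise.map (fun p : Int × (Int × Int) => p.1) (fun a b hab => hab) h).imp (fun {a b} h => ne_of_lt h)

theorem pvStep (I1 I2 : List Int) (s : Int) (b1 b2 : Bool)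
    (h1 : ∀ i ∈ I1, i ≠ s) (h2 : ∀ i ∈ I2, i ≠ s) :
    (((if b1 then [s] else []) ++ I1).filter
        (fun i => ((if b2 then [s] else []) ++ I2).contains i)).length
      = (if b1 && b2 then 1 else 0) + (I1.filter (fun i => I2.contains i)).length := by
  have hc2 : I2.contains s = false := by
    simp only [List.contains_eq_any_beq, List.any_eq_false]
    intro i hi; simpa [beq_iff_eq] using (h2 i hi).symm
  have hcongr : I1.filter (fun i => ((if b2 then [s] else []) ++ I2).contains i)
      = I1.filter (fun i => I2.contains i) := by
    apply List.filter_congr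
    intro i hi
    cases b2 <;> simp [h1 i hi]
  cases b1 <;> cases b2 <;>
    (simp_all [List.filter_cons]; try omega)

theorem pvInter_length (l : List (Int × Int)) (s : Int) :
    ((pvIdx (fun ab => ab.1 == 1) l s).filter
        (fun i => (pvIdx (fun ab => ab.2 == 1) l s).contains i)).length
      = l.countP (fun ab => ab.1 == 1 && ab.2 == 1) := by
  induction l generalizing s with
  | nil => simp [pvIdx_nil]
  | cons x t ih =>
    have hkey : ∀ (Q : Int × Int → Bool) i, i ∈ pvIdx Q t (s + 1) → i ≠ s := by
      intro Q i hi
      have := pvIdx_le Q t (s + 1) i hi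
      omega
    rw [List.countP_cons]
    simp only [pvIdx_cons]
    rw [pvStep _ _ s (x.1 == 1) (x.2 == 1)
        (fun i hi => hkey _ i hi) (fun i hi => hkey _ i hi), ih]
    cases hb : (x.1 == 1 && x.2 == 1) <;> simp [hb] <;> try omega

theorem pvFoldl_count (l : List (Int × Int)) :
    ∀ acc : Int,
      l.foldl (fun acc ab => if ab.1 = 1 then acc + (if ab.1 = ab.2 then 1 else 0) else acc) acc
        = acc + (l.countP (fun ab => ab.1 == 1 && ab.2 == 1) : Int) := by
  induction l with
  | nil => simp
  | cons x t ih =>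
    intro acc
    simp only [List.foldl_cons, List.countP_cons, ih]
    by_cases h1 : x.1 = 1
    · by_cases h2 : x.2 = 1
      · simp [h1, h2]; ring
      · have hne : ¬ (1 : Int) = x.2 := fun h => h2 h.symm
        simp [h1, h2, hne]
    · simp [h1]

theorem does_overlap_spec : Claim_equal_does_overlap := by
  intro item min_overlap taxa_profiles _hDom _hPre
  unfold Spec_does_overlap does_overlap does_overlap_alt
  cases h0 : PySem.List.pyGet? item 0 with
  | none => rfl
  | some k0 =>
    cases h1 : PySem.List.pyGet? item 1 with
    | none =>
      cases hk : taxa_profiles.lookup k0 <;> simp [Option.bind, hk]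
    | some k1 =>
      dsimp only [h0, h1, Option.bind_some]
      cases g0 : taxa_profiles.lookup k0 with
      | none => rfl
      | some pr0 =>
        cases g1 : taxa_profiles.lookup k1 with
        | none => rfl
        | some pr1 =>
          dsimp only
          rw [pvFoldl_count]
          have hn1 := pvIdx_nodup (fun ab => ab.1 == 1) (List.zip pr0 pr1) 0
          have hn2 := pvIdx_nodup (fun ab => ab.2 == 1) (List.zip pr0 pr1) 0
          have e1 := PySem.Set.ofList_eq_self_of_nodup _ hn1
          have e2 := PySem.Set.ofList_eq_self_of_nodup _ hn2
          have hlen := pvInter_length (List.zip pr0 pr1) 0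
          simp only [pvIdx] at e1 e2 hlen
          rw [e1, e2]
          simp only [PySem.Set.inter, PySem.Set.len, PySem.Set.contains]
          simp only [hlen]
          by_cases h : ((List.zip pr0 pr1).countP (fun ab => ab.1 == 1 && ab.2 == 1) : Int) > min_overlap
          · simp [h]
          · simp [h]
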